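-- pv_equiv track=rewrite | github.com/dizonPhilip/HackerRank | ClimbingTheLeaderboard/climbing_the_leaderboard.py | generate_rankings
-- ===== SOURCE A (Python) =====
-- def generate_rankings(scores):
--     rank = 1
--     rankings = {}
--     for score in scores:
--         if score in rankings:
--             continue
--         rankings[score] = rank
--         rank += 1
--     return rankings
-- ===== SOURCE B (Python) =====
-- def generate_rankings(scores):
--     order = sorted(set(scores), key=scores.index)
--     return dict(zip(order, range(1, len(order) + 1)))
-- ===== Notes on version B (the rewrite author's own statement) =====
-- stated objective: alternative
-- what changed: Replaces A's single-pass loop with a rank counter and membership skip by a sort-based pipeline: dedupe with set(), sort the distinct scores by their first-occurrence index via list.index, and zip them with the rank range; trades A's O(n) pass for an index-sort at O(n^2) worst case.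
import Mathlib
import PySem

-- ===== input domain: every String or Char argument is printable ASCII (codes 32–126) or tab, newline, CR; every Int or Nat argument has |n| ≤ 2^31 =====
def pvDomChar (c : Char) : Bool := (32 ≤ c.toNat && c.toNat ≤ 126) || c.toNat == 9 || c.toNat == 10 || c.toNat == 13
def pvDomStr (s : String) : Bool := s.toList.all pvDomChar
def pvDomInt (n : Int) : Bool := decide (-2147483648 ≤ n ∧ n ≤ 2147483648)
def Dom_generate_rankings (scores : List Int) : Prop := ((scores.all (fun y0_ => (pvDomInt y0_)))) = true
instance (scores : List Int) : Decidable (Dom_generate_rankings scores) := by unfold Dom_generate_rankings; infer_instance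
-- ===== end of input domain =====

-- B replaces A's single-pass counter-and-membership loop by a sort-based pipeline
-- (set() dedupe, sort by first-occurrence index, zip with ranks); objective: alternative.


-- ===== PORT A =====
-- loop state: (rank, rankings); returns the dict as its items list
def generate_rankings (scores : List Int) : List (Int × Int) :=
  (scores.foldl
    (fun (st : Int × PySem.Dict Int Int) score =>
      if st.2.contains score then st
      else (st.1 + 1, st.2.insert score st.1))
    (1, PySem.Dict.empty)).2.items

-- ===== PORT B =====
-- order = sorted(set(scores), key=scores.index); dict(zip(order, range(1, len(order)+1)))
-- (scores.index always succeeds on members of set(scores); the keys of the zipped dict are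
-- distinct, so the dict's items are exactly the zip list)
def generate_rankings_alt (scores : List Int) : List (Int × Int) :=
  let order := PySem.List.sorted (PySem.Set.ofList scores)
      (fun s => (PySem.List.index? scores s).getD 0) false
  order.zip (PySem.List.pyRange 1 ((order.length : Int) + 1) 1)

-- ===== PRECONDITION & SPEC =====
def Spec_generate_rankings (scores : List Int) (out : List (Int × Int)) : Prop := out = generate_rankings_alt scores
instance (scores : List Int) (out : List (Int × Int)) : Decidable (Spec_generate_rankings scores out) := by unfold Spec_generate_rankings; infer_instance

-- ===== CLAIM (what is proved, stated in full; the proofs are below) =====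
def Claim_equal_generate_rankings : Prop := ∀ (scores : List Int), Dom_generate_rankings scores → Spec_generate_rankings scores (generate_rankings scores)

-- ===== LEMMAS AND PROOFS =====

-- first occurrences of xs not already in seen, in order
def pvUniq (seen : List Int) : List Int → List Int
  | [] => []
  | x :: xs => if x ∈ seen then pvUniq seen xs else x :: pvUniq (x :: seen) xs

-- pair each element with consecutive ranks starting at r
def pvTag (r : Int) : List Int → List (Int × Int)
  | [] => []
  | x :: xs => (x, r) :: pvTag (r + 1) xs

theorem pvUniq_congr (xs : List Int) : ∀ (s s' : List Int), (∀ y, y ∈ s ↔ y ∈ s') →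
    pvUniq s xs = pvUniq s' xs := by
  induction xs with
  | nil => intro s s' _; rfl
  | cons x xs ih =>
    intro s s' h
    simp only [pvUniq, h x]
    by_cases hx : x ∈ s'
    · simp [hx, ih s s' h]
    · have : ∀ y, y ∈ x :: s ↔ y ∈ x :: s' := by
        intro y; simp [h y]
      simp [hx, ih _ _ this]

theorem pvUniq_update (xs : List Int) : ∀ (s : List Int),
    PySem.Set.update s xs = s ++ pvUniq s xs := by
  induction xs with
  | nil => intro s; simp [PySem.Set.update_nil, pvUniq]
  | cons x xs ih =>
    intro s
    rw [PySem.Set.update_cons]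
    by_cases hx : x ∈ s
    · rw [show PySem.Set.add s x = s from by simp [PySem.Set.add, hx], ih s]
      simp [pvUniq, hx]
    · rw [show PySem.Set.add s x = s ++ [x] from by simp [PySem.Set.add, hx],
        ih (s ++ [x]),
        pvUniq_congr xs (s ++ [x]) (x :: s) (by intro y; simp; tauto)]
      simp [pvUniq, hx]

theorem pvUniq_dedup (xs : List Int) : pvUniq [] xs = PySem.List.dedup xs := by
  have h := pvUniq_update xs []
  rw [PySem.Set.update_nil_left] at h
  simp only [List.nil_append] at h
  simp [PySem.List.dedup_eq_ofList, h]

-- members of pvUniq seen xs avoid seen and come from xs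
theorem pvUniq_mem (xs : List Int) : ∀ (s : List Int) (a : Int),
    a ∈ pvUniq s xs → a ∉ s ∧ a ∈ xs := by
  induction xs with
  | nil => intro s a h; simp [pvUniq] at h
  | cons x xs ih =>
    intro s a h
    by_cases hx : x ∈ s
    · simp only [pvUniq, if_pos hx] at h
      rcases ih s a h with ⟨h1, h2⟩
      exact ⟨h1, List.mem_cons_of_mem _ h2⟩
    · simp only [pvUniq, if_neg hx, List.mem_cons] at h
      rcases h with rfl | h
      · exact ⟨hx, List.mem_cons_self⟩
      · rcases ih (x :: s) a h with ⟨h1, h2⟩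
        exact ⟨fun hs => h1 (List.mem_cons_of_mem _ hs), List.mem_cons_of_mem _ h2⟩

-- first-occurrence order means strictly increasing first indices
theorem pvUniq_pairwise_idxOf (xs : List Int) : ∀ (s : List Int),
    (pvUniq s xs).Pairwise (fun a b => List.idxOf a xs < List.idxOf b xs) := by
  induction xs with
  | nil => intro s; simp [pvUniq]
  | cons x xs ih =>
    intro s
    have step : ∀ (s' : List Int), x ∉ pvUniq s' xs →
        (pvUniq s' xs).Pairwise (fun a b => List.idxOf a (x :: xs) < List.idxOf b (x :: xs)) := by
      intro s' hx
      refine (ih s').imp_of_mem ?_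
      intro a b ha hb hab
      have hax : a ≠ x := fun h => hx (h ▸ ha)
      have hbx : b ≠ x := fun h => hx (h ▸ hb)
      rw [List.idxOf_cons_ne _ (fun h => hax h.symm), List.idxOf_cons_ne _ (fun h => hbx h.symm)]
      omega
    by_cases hx : x ∈ s
    · simp only [pvUniq, if_pos hx]
      exact step s (fun h => (pvUniq_mem xs s x h).1 hx)
    · simp only [pvUniq, if_neg hx]
      refine List.Pairwise.cons ?_ (step (x :: s)
        (fun h => (pvUniq_mem xs (x :: s) x h).1 List.mem_cons_self))
      intro b hb
      have hbx : b ≠ x := fun h =>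
        (pvUniq_mem xs (x :: s) b hb).1 (h ▸ List.mem_cons_self)
      rw [List.idxOf_cons_self, List.idxOf_cons_ne _ (fun h => hbx h.symm)]
      omega

-- idxOf? on a member is some of idxOf
theorem pvIdxOf?_mem {xs : List Int} {a : Int} (h : a ∈ xs) :
    xs.idxOf? a = some (xs.idxOf a) := by
  rw [List.idxOf_eq_getD_idxOf?]
  cases hx : xs.idxOf? a with
  | none => exact absurd ((List.isSome_idxOf?).mpr h) (by simp [hx])
  | some k => simp

-- B's sort by scores.index returns the distinct scores in first-occurrence order
theorem pvSorted_eq_dedup (scores : List Int) :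
    PySem.List.sorted (PySem.Set.ofList scores)
      (fun s => (PySem.List.index? scores s).getD 0) false = PySem.List.dedup scores := by
  apply PySem.List.sorted_eq_of_perm_of_pairwise_lt
  · rw [← PySem.List.dedup_eq_ofList]
  · have hp := pvUniq_pairwise_idxOf scores []
    rw [pvUniq_dedup] at hp
    refine hp.imp_of_mem ?_
    intro a b ha hb hab
    have ha' : a ∈ scores := (PySem.List.mem_dedup scores a).mp ha
    have hb' : b ∈ scores := (PySem.List.mem_dedup scores b).mp hb
    rw [PySem.List.index?_eq_idxOf?, PySem.List.index?_eq_idxOf?,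
      pvIdxOf?_mem ha', pvIdxOf?_mem hb']
    exact hab

-- zipping a list with range(r, r + len) is consecutive tagging
theorem pvZip_pyRange (l : List Int) : ∀ (r : Int),
    l.zip (PySem.List.pyRange r (r + (l.length : Int)) 1) = pvTag r l := by
  induction l with
  | nil => intro r; simp [pvTag]
  | cons x xs ih =>
    intro r
    have hlt : r < r + ((x :: xs).length : Int) := by simp only [List.length_cons]; push_cast; omega
    rw [PySem.List.pyRange_one_cons hlt]
    simp only [List.zip_cons_cons, pvTag]
    have h2 : r + ((x :: xs).length : Int) = (r + 1) + (xs.length : Int) := by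
      simp only [List.length_cons]; push_cast; ring
    rw [h2, ih (r + 1)]

theorem pvLoop_items (scores : List Int) : ∀ (r : Int) (d : PySem.Dict Int Int),
    d.keys.Nodup →
    (scores.foldl
      (fun (st : Int × PySem.Dict Int Int) score =>
        if st.2.contains score then st
        else (st.1 + 1, st.2.insert score st.1))
      (r, d)).2.items = d.items ++ pvTag r (pvUniq d.keys scores) := by
  induction scores with
  | nil => intro r d _; simp [pvUniq, pvTag]
  | cons x xs ih =>
    intro r d hnd
    simp only [List.foldl_cons]
    by_cases hc : d.contains x = true
    · have hxk : x ∈ d.keys := (PySem.Dict.contains_iff_mem_keys d x).mp hc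
      simp only [hc, pvUniq, hxk, if_pos]
      exact ih r d hnd
    · have hc' : d.contains x = false := by simpa using hc
      have hxk : x ∉ d.keys := fun h => hc ((PySem.Dict.contains_iff_mem_keys d x).mpr h)
      simp only [hc', Bool.false_eq_true, if_false, pvUniq, hxk]
      have hkeys : (d.insert x r).keys = d.keys ++ [x] :=
        PySem.Dict.keys_insert_of_not_contains d r hc'
      have hnd' : (d.insert x r).keys.Nodup := by
        rw [hkeys]
        simp [List.nodup_append, hnd]
        intro a ha h
        exact hxk (h ▸ ha)
      rw [ih (r + 1) (d.insert x r) hnd',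
        PySem.Dict.items_insert_of_not_contains d r hc', hkeys,
        pvUniq_congr xs (d.keys ++ [x]) (x :: d.keys) (by intro y; simp; tauto)]
      simp [pvTag]

-- ===== VERDICT (by name: the statement is the Claim_ definition above) =====
theorem generate_rankings_spec : Claim_equal_generate_rankings := by
  intro scores _
  unfold Spec_generate_rankings generate_rankings generate_rankings_alt
  rw [pvLoop_items scores 1 PySem.Dict.empty (by simp [PySem.Dict.empty, PySem.Dict.keys])]
  have hk : (PySem.Dict.empty : PySem.Dict Int Int).keys = [] := rfl
  rw [hk, pvUniq_dedup]
  simp only [pvSorted_eq_dedup]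
  have h2 : (1 : Int) + ((PySem.List.dedup scores).length : Int)
      = ((PySem.List.dedup scores).length : Int) + 1 := by ring
  rw [← h2, pvZip_pyRange]
  simp [PySem.Dict.empty]
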